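-- pv_equiv track=rewrite | github.com/pass-culture/pass-culture-main | scripts/seed/05-seed_bookings.py | generate_booking_token
-- ===== SOURCE A (Python) =====
-- def generate_booking_token(booking_number: int) -> str:
--     """Generate a unique 6-character token for a booking based on its number."""
--     chars = "ABCDEFGHIJKLMNOPQRSTUVWXYZ0123456789"
--     base = len(chars)
--     token = ""
--     num = booking_number
--     for _ in range(6):
--         token = chars[num % base] + token
--         num //= base
--     return token
-- ===== SOURCE B (Python) =====
-- def generate_booking_token(booking_number: int) -> str:
--     """Generate a unique 6-character token for a booking based on its number."""
--     chars = "ABCDEFGHIJKLMNOPQRSTUVWXYZ0123456789"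
--     base = len(chars)
--     return "".join(chars[(booking_number // base ** (5 - i)) % base] for i in range(6))
-- ===== Notes on version B (the rewrite author's own statement) =====
-- stated objective: simpler
-- what changed: Replaces the running accumulator (repeatedly floor-dividing a mutated num and prepending) with a direct left-to-right join where each output position is computed from booking_number via its positional weight base**(5-i).
import Mathlib
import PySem

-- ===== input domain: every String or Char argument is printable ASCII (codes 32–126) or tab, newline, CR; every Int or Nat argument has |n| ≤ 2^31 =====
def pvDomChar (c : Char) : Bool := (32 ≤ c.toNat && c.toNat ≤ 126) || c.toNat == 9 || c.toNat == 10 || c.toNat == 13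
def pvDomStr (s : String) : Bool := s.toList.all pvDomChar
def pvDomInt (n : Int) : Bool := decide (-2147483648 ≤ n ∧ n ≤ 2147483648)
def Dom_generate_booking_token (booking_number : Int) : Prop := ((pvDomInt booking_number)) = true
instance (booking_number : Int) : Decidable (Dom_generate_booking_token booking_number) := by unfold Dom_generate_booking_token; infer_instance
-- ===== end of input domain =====

-- B builds the token left-to-right, each position from booking_number via its positional weight base^(5-i), instead of A's right-to-left accumulator; objective: simpler.
-- ===== PORT A =====
-- literal port of A: 6-step loop, prepending chars[num % base] and mutating num //= base
def generate_booking_token (booking_number : Int) : String :=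
  let chars := "ABCDEFGHIJKLMNOPQRSTUVWXYZ0123456789"
  let base : Int := PySem.Str.len chars
  let res := (List.range 6).foldl
      (fun (st : List Char × Int) _ =>
        (PySem.List.pyGetD chars.toList (PySem.Int.mod st.2 base) 'A' :: st.1,
         PySem.Int.floordiv st.2 base))
      ([], booking_number)
  String.mk res.1

-- ===== PORT B =====
-- literal port of B: "".join(chars[(booking_number // base ** (5 - i)) % base] for i in range(6))
def generate_booking_token_alt (booking_number : Int) : String :=
  let chars := "ABCDEFGHIJKLMNOPQRSTUVWXYZ0123456789"
  let base : Int := PySem.Str.len chars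
  String.mk ((List.range 6).map (fun i =>
    PySem.List.pyGetD chars.toList
      (PySem.Int.mod (PySem.Int.floordiv booking_number (base ^ (5 - i))) base) 'A'))

-- ===== PRECONDITION & SPEC =====
def Spec_generate_booking_token (booking_number : Int) (out : String) : Prop := out = generate_booking_token_alt booking_number
instance (booking_number : Int) (out : String) : Decidable (Spec_generate_booking_token booking_number out) := by unfold Spec_generate_booking_token; infer_instance

-- ===== CLAIM (what is proved, stated in full; the proofs are below) =====
def Claim_equal_generate_booking_token : Prop := ∀ (booking_number : Int), Dom_generate_booking_token booking_number → Spec_generate_booking_token booking_number (generate_booking_token booking_number)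

-- ===== LEMMAS AND PROOFS =====

-- ===== VERDICT (by name: the statement is the Claim_ definition above) =====
theorem generate_booking_token_spec : Claim_equal_generate_booking_token := by
  intro n _
  unfold Spec_generate_booking_token generate_booking_token generate_booking_token_alt
  have h36 : PySem.Str.len "ABCDEFGHIJKLMNOPQRSTUVWXYZ0123456789" = 36 := by decide
  simp only [h36, List.range_succ, List.range_zero, List.foldl_cons, List.foldl_nil,
    List.map_cons, List.map_nil, List.nil_append, List.cons_append,
    PySem.Int.floordiv_eq_ediv_of_pos (by norm_num : (0:Int) < 36),
    PySem.Int.mod_eq_emod_of_pos (by norm_num : (0:Int) < 36)]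
  norm_num
  refine congrArg String.mk ?_
  simp only [List.cons.injEq]
  and_intros <;> first
    | trivial
    | exact congrArg (fun k => PySem.List.pyGetD _ k 'A') (by omega)
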